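-- pv_equiv track=rewrite | github.com/xvandervort/graphoid | src/glang/cli.py | parse_multiline_statements
-- ===== SOURCE A (Python) =====
-- def parse_multiline_statements(content: str) -> list:
--     """Parse content into complete statements, handling multiline constructs.
--
--     This function groups lines into complete statements by counting braces,
--     similar to the REPL's multiline handling.
--     """
--     statements = []
--     current_statement = []
--
--     lines = content.strip().split('\n')
--
--     for line in lines:
--         # Skip comment-only lines and empty lines at statement boundaries
--         if line.strip().startswith('#') or not line.strip():
--             if current_statement:  # Add empty line to current statement
--                 current_statement.append(line)
--             continue
--
--         current_statement.append(line)
--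
--         # Check if current statement is complete
--         combined = '\n'.join(current_statement)
--         if is_statement_complete(combined):
--             statements.append(combined)
--             current_statement = []
--
--     # Handle any remaining incomplete statement
--     if current_statement:
--         statements.append('\n'.join(current_statement))
--
--     return [s for s in statements if s.strip()]
--
-- def is_statement_complete(statement: str) -> bool:
--     """Check if a statement appears to be complete by counting braces."""
--     brace_count = 0
--     paren_count = 0
--     bracket_count = 0
--     in_string = False
--     escape_next = False
--
--     i = 0
--     while i < len(statement):
--         char = statement[i]
--
--         if escape_next:
--             escape_next = False
--             i += 1
--             continue
--
--         if char == '\\':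
--             escape_next = True
--             i += 1
--             continue
--
--         if char == '"' and not escape_next:
--             in_string = not in_string
--             i += 1
--             continue
--
--         if in_string:
--             i += 1
--             continue
--
--         # Count delimiters outside of strings
--         if char == '{':
--             brace_count += 1
--         elif char == '}':
--             brace_count -= 1
--         elif char == '(':
--             paren_count += 1
--         elif char == ')':
--             paren_count -= 1
--         elif char == '[':
--             bracket_count += 1
--         elif char == ']':
--             bracket_count -= 1
--
--         i += 1
--
--     # Statement is complete if all delimiters are balanced
--     return brace_count == 0 and paren_count == 0 and bracket_count == 0
-- ===== SOURCE B (Python) =====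
-- def parse_multiline_statements(content: str) -> list:
--     """Group lines into complete statements by maintaining delimiter/string/escape
--     state incrementally, scanning each character once (O(total length))."""
--     statements = []
--     current = []
--     brace = paren = bracket = 0
--     in_string = False
--     escape = False
--
--     def feed(text):
--         nonlocal brace, paren, bracket, in_string, escape
--         for ch in text:
--             if escape:
--                 escape = False
--             elif ch == '\\':
--                 escape = True
--             elif ch == '"':
--                 in_string = not in_string
--             elif in_string:
--                 pass
--             elif ch == '{':
--                 brace += 1
--             elif ch == '}':
--                 brace -= 1
--             elif ch == '(':
--                 paren += 1
--             elif ch == ')':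
--                 paren -= 1
--             elif ch == '[':
--                 bracket += 1
--             elif ch == ']':
--                 bracket -= 1
--
--     for line in content.strip().split('\n'):
--         stripped = line.strip()
--         if stripped.startswith('#') or not stripped:
--             if current:
--                 current.append(line)
--                 feed('\n')
--                 feed(line)
--             continue
--         if current:
--             feed('\n')
--         current.append(line)
--         feed(line)
--         if brace == 0 and paren == 0 and bracket == 0:
--             statements.append('\n'.join(current))
--             current = []
--             brace = paren = bracket = 0
--             in_string = False
--             escape = False
--
--     if current:
--         statements.append('\n'.join(current))
--
--     return [s for s in statements if s.strip()]
-- ===== Notes on version B (the rewrite author's own statement) =====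
-- stated objective: faster
-- what changed: B maintains the brace/paren/bracket counts and in-string/escape scanner state incrementally, feeding only the newly read line (plus the joining newline), instead of re-joining and re-scanning the entire accumulated statement after every line as A's is_statement_complete does.
import Mathlib
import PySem

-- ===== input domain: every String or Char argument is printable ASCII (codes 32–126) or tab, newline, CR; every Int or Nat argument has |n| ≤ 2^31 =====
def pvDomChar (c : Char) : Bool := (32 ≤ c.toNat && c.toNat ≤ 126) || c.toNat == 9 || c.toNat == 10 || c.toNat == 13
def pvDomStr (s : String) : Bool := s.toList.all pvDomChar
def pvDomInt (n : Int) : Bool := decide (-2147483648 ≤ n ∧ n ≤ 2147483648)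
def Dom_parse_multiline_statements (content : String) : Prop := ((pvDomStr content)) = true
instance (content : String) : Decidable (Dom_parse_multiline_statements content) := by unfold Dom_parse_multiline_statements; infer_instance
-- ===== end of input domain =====

-- B rescans nothing: it maintains the delimiter/string/escape state incrementally per line
-- instead of re-joining and re-scanning the whole current statement after every line (objective: faster).

-- ===== PORT A =====
-- while-loop of is_statement_complete: state (brace, paren, bracket, in_string, escape_next)
def pvScanLoopA : List Char → Int → Int → Int → Bool → Bool → Int × Int × Int
  | [], b, p, k, _, _ => (b, p, k)
  | c :: rest, b, p, k, ins, esc =>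
    if esc then pvScanLoopA rest b p k ins false
    else if c == '\\' then pvScanLoopA rest b p k ins true
    else if c == '"' && !esc then pvScanLoopA rest b p k (!ins) esc
    else if ins then pvScanLoopA rest b p k ins esc
    else if c == '{' then pvScanLoopA rest (b + 1) p k ins esc
    else if c == '}' then pvScanLoopA rest (b - 1) p k ins esc
    else if c == '(' then pvScanLoopA rest b (p + 1) k ins esc
    else if c == ')' then pvScanLoopA rest b (p - 1) k ins esc
    else if c == '[' then pvScanLoopA rest b p (k + 1) ins esc
    else if c == ']' then pvScanLoopA rest b p (k - 1) ins esc
    else pvScanLoopA rest b p k ins esc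

def is_statement_complete (statement : String) : Bool :=
  let r := pvScanLoopA statement.toList 0 0 0 false false
  r.1 == 0 && r.2.1 == 0 && r.2.2 == 0

-- body of A's for-loop; accumulator (statements, current_statement)
def pvStepA (acc : List String × List String) (line : String) : List String × List String :=
  if PySem.Str.startswith (PySem.Str.strip line) "#" || PySem.Str.strip line == "" then
    if acc.2 ≠ [] then (acc.1, acc.2 ++ [line]) else acc
  else
    let current := acc.2 ++ [line]
    let combined := PySem.Str.join "\n" current
    if is_statement_complete combined then (acc.1 ++ [combined], [])
    else (acc.1, current)

def parse_multiline_statements (content : String) : List String :=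
  let lines := (PySem.Str.split? (PySem.Str.strip content) "\n").getD []
  let r := lines.foldl pvStepA ([], [])
  let statements := if r.2 ≠ [] then r.1 ++ [PySem.Str.join "\n" r.2] else r.1
  statements.filter (fun s => PySem.Str.strip s != "")

-- ===== PORT B =====
-- scanner state (brace, paren, bracket, in_string, escape), updated one character at a time
abbrev PvSt := Int × Int × Int × Bool × Bool

def pvStepChar (st : PvSt) (c : Char) : PvSt :=
  let (b, p, k, ins, esc) := st
  if esc then (b, p, k, ins, false)
  else if c == '\\' then (b, p, k, ins, true)
  else if c == '"' then (b, p, k, !ins, esc)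
  else if ins then st
  else if c == '{' then (b + 1, p, k, ins, esc)
  else if c == '}' then (b - 1, p, k, ins, esc)
  else if c == '(' then (b, p + 1, k, ins, esc)
  else if c == ')' then (b, p - 1, k, ins, esc)
  else if c == '[' then (b, p, k + 1, ins, esc)
  else if c == ']' then (b, p, k - 1, ins, esc)
  else st

def pvFeed (st : PvSt) (text : List Char) : PvSt := text.foldl pvStepChar st

-- body of B's for-loop; accumulator ((statements, current), scanner state)
def pvStepB (acc : (List String × List String) × PvSt) (line : String) :
    (List String × List String) × PvSt :=
  let stripped := PySem.Str.strip line
  if PySem.Str.startswith stripped "#" || stripped == "" then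
    if acc.1.2 = [] then acc
    else ((acc.1.1, acc.1.2 ++ [line]), pvFeed (pvFeed acc.2 ['\n']) line.toList)
  else
    let st := if acc.1.2 = [] then pvFeed acc.2 line.toList
              else pvFeed (pvFeed acc.2 ['\n']) line.toList
    let current := acc.1.2 ++ [line]
    if st.1 == 0 && st.2.1 == 0 && st.2.2.1 == 0 then
      ((acc.1.1 ++ [PySem.Str.join "\n" current], []), (0, 0, 0, false, false))
    else ((acc.1.1, current), st)

def parse_multiline_statements_alt (content : String) : List String :=
  let lines := (PySem.Str.split? (PySem.Str.strip content) "\n").getD []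
  let r := lines.foldl pvStepB (([], []), (0, 0, 0, false, false))
  let statements := if r.1.2 ≠ [] then r.1.1 ++ [PySem.Str.join "\n" r.1.2] else r.1.1
  statements.filter (fun s => PySem.Str.strip s != "")

-- ===== PRECONDITION & SPEC =====
def Spec_parse_multiline_statements (content : String) (out : List String) : Prop := out = parse_multiline_statements_alt content
instance (content : String) (out : List String) : Decidable (Spec_parse_multiline_statements content out) := by unfold Spec_parse_multiline_statements; infer_instance

-- ===== CLAIM (what is proved, stated in full; the proofs are below) =====
def Claim_equal_parse_multiline_statements : Prop := ∀ (content : String), Dom_parse_multiline_statements content → Spec_parse_multiline_statements content (parse_multiline_statements content)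

-- ===== LEMMAS AND PROOFS =====

def pvCounts (st : PvSt) : Int × Int × Int := (st.1, st.2.1, st.2.2.1)

-- A's whole-string scan computes the counter part of B's incremental state
lemma pvScanA_eq (cs : List Char) : ∀ (b p k : Int) (ins esc : Bool),
    pvScanLoopA cs b p k ins esc = pvCounts (pvFeed (b, p, k, ins, esc) cs) := by
  induction cs with
  | nil => intro b p k ins esc; rfl
  | cons c rest ih =>
    intro b p k ins esc
    show pvScanLoopA (c :: rest) b p k ins esc = pvCounts (pvFeed (pvStepChar (b, p, k, ins, esc) c) rest)
    cases esc <;> simp only [pvScanLoopA, pvStepChar, Bool.not_false, Bool.and_true,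
      if_true, if_false, Bool.false_eq_true] <;>
      (first | exact ih .. | (split_ifs <;> exact ih ..))

lemma pvFeed_append (st : PvSt) (s t : List Char) :
    pvFeed st (s ++ t) = pvFeed (pvFeed st s) t := List.foldl_append

lemma pvJoin_append (sep : List Char) (xs : List (List Char)) (y : List Char) :
    PySem.Chars.join sep (xs ++ [y]) =
      if xs = [] then y else PySem.Chars.join sep xs ++ sep ++ y := by
  induction xs with
  | nil => simp [PySem.Chars.join_singleton]
  | cons a rest ih =>
    cases rest with
    | nil => simp [PySem.Chars.join_cons_cons, PySem.Chars.join_singleton]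
    | cons d rs =>
      have ih' : PySem.Chars.join sep (d :: (rs ++ [y])) = PySem.Chars.join sep (d :: rs) ++ sep ++ y := by
        simpa [List.cons_append] using ih
      simp only [List.cons_append, PySem.Chars.join_cons_cons]
      rw [ih']
      simp [List.append_assoc]

-- toList of '\n'.join(cur ++ [line])
lemma pvJoinS_append (cur : List String) (line : String) :
    (PySem.Str.join "\n" (cur ++ [line])).toList =
      if cur = [] then line.toList
      else (PySem.Str.join "\n" cur).toList ++ '\n' :: line.toList := by
  by_cases h : cur = [] <;>
    simp [h, PySem.Str.toList_join, pvJoin_append, List.map_eq_nil_iff]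

lemma pvInit_feed_nil : pvFeed (0, 0, 0, false, false) (PySem.Str.join "\n" ([] : List String)).toList
    = ((0 : Int), (0 : Int), (0 : Int), false, false) := by
  simp [PySem.Str.toList_join, PySem.Chars.join_nil, pvFeed]

-- the loop invariant: B's scanner state is A's scan of the joined current statement
lemma pvFold_inv (lines : List String) : ∀ (stmts cur : List String),
    lines.foldl pvStepB ((stmts, cur), pvFeed (0, 0, 0, false, false) (PySem.Str.join "\n" cur).toList)
      = (lines.foldl pvStepA (stmts, cur),
         pvFeed (0, 0, 0, false, false)
           (PySem.Str.join "\n" (lines.foldl pvStepA (stmts, cur)).2).toList) := by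
  induction lines with
  | nil => intro stmts cur; rfl
  | cons line rest ih =>
    intro stmts cur
    simp only [List.foldl_cons]
    by_cases hc : PySem.Str.startswith (PySem.Str.strip line) "#" || PySem.Str.strip line == ""
    · by_cases h : cur = []
      · simp only [pvStepA, pvStepB, hc, if_true, h]
        simpa using ih stmts []
      · have hst : pvFeed (pvFeed (pvFeed (0,0,0,false,false) (PySem.Str.join "\n" cur).toList) ['\n']) line.toList
            = pvFeed (0,0,0,false,false) (PySem.Str.join "\n" (cur ++ [line])).toList := by
          rw [pvJoinS_append, if_neg h, pvFeed_append]
          rfl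
        simp only [pvStepA, pvStepB, hc, if_true, ne_eq, h, not_false_eq_true, ite_false]
        rw [hst]
        exact ih stmts (cur ++ [line])
    · -- code line: the new state is the scan of the new joined statement
      have hst : (if cur = [] then pvFeed (pvFeed (0,0,0,false,false) (PySem.Str.join "\n" cur).toList) line.toList
                  else pvFeed (pvFeed (pvFeed (0,0,0,false,false) (PySem.Str.join "\n" cur).toList) ['\n']) line.toList)
          = pvFeed (0,0,0,false,false) (PySem.Str.join "\n" (cur ++ [line])).toList := by
        rw [pvJoinS_append]
        by_cases h : cur = []
        · rw [if_pos h, if_pos h, h, pvInit_feed_nil]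
        · rw [if_neg h, if_neg h, pvFeed_append]
          rfl
      have hcomp : ∀ st, st = pvFeed (0,0,0,false,false) (PySem.Str.join "\n" (cur ++ [line])).toList →
          (st.1 == 0 && st.2.1 == 0 && st.2.2.1 == 0)
            = is_statement_complete (PySem.Str.join "\n" (cur ++ [line])) := by
        intro st hstdef
        simp only [is_statement_complete, pvScanA_eq, pvCounts, hstdef]
      by_cases hdone : is_statement_complete (PySem.Str.join "\n" (cur ++ [line])) = true
      · simp only [pvStepA, pvStepB, hc, if_false, Bool.false_eq_true, hst,
          hcomp _ rfl, hdone, if_true]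
        have h0 := pvInit_feed_nil
        rw [show ((0:Int),(0:Int),(0:Int),false,false) = pvFeed (0,0,0,false,false) (PySem.Str.join "\n" ([] : List String)).toList from h0.symm]
        simpa using ih (stmts ++ [PySem.Str.join "\n" (cur ++ [line])]) []
      · have hdone' : is_statement_complete (PySem.Str.join "\n" (cur ++ [line])) = false := by
          simpa using hdone
        simp only [pvStepA, pvStepB, hc, if_false, Bool.false_eq_true, hst,
          hcomp _ rfl, hdone']
        exact ih stmts (cur ++ [line])

-- ===== VERDICT (by name: the statement is the Claim_ definition above) =====
theorem parse_multiline_statements_spec : Claim_equal_parse_multiline_statements := by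
  intro content _
  unfold Spec_parse_multiline_statements parse_multiline_statements parse_multiline_statements_alt
  have h := pvFold_inv ((PySem.Str.split? (PySem.Str.strip content) "\n").getD []) [] []
  rw [pvInit_feed_nil] at h
  simp only [h]
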